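-- pv_equiv track=rewrite | github.com/bhanueve/IITM3 | Week3/grpa1.py | DishPrepareOrder
-- ===== SOURCE A (Python) =====
-- def prelim_dict(L):
--     """
--     takes in a list of item names and return a dictionary with item names as keys and the
--
--     number of orders for corresponding items as values
--
--     Eg: input: [1006, 1008, 1009, 1008, 1007, 1005, 1008, 1001, 1003, 1009, 1006, 1003, 1004, 1002, 1008, 1005, 1004, 1007, 1006, 1002, 1002, 1001, 1004, 1001, 1003, 1007, 1007, 1005, 1004, 1002]
--
--         output: {1006: 3, 1008: 4, 1009: 2, 1007: 4, 1005: 3, 1001: 3, 1003: 3, 1004: 4, 1002: 4}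
--
--     Parameters
--     ----------
--     L : List of integers
--
--     Returns
--     -------
--     out : dictionary where both the keys and values are integers
--
--     """
--     out = {}
--     for i in L:
--         if i in out:
--             out[i] += 1
--         else:
--             out[i] = 1
--     return out
--
-- def count_list(D):
--     """
--     takes in a dictionary with item name as key and number of orders as value and returns
--
--     list of number of orders sorted in descending order
--
--     Eg: input: {1006: 3, 1008: 4, 1009: 2, 1007: 4, 1005: 3, 1001: 3, 1003: 3, 1004: 4, 1002: 4}
--
--         output: [4, 3, 2]
--     """
--     count_list = []
--     for i in D:
--         count_list.append(D[i])
--     count_list = sorted(count_list, reverse=True)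
--     count_list_final = []
--     for i in count_list:
--         if i in count_list_final:
--             continue
--         else:
--             count_list_final.append(i)
--     return count_list_final
--
-- def swap_key_value(D):
--     """
--     takes in a dictionary and swaps the keys with values where the new keys are the number of
--
--     orders and values are the list of all item names odered the corresponding number of times sorted in ascending order
--
--     Eg: input: {1006: 3, 1008: 4, 1009: 2, 1007: 4, 1005: 3, 1001: 3, 1003: 3, 1004: 4, 1002: 4}
--
--         output: {3: [1001, 1003, 1005, 1006], 4: [1002, 1004, 1007, 1008], 2: [1009]}
--
--     Parameters
--     ----------
--     D : dictionary
--
--     Returns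
--     -------
--     first_dict: dictionary with keys and values swapped
--
--     """
--     first_dict = {}
--     for i in D:
--         if D[i] in first_dict:
--             first_dict[D[i]].append(i)
--             first_dict[D[i]].sort()
--         else:
--             first_dict[D[i]] = [i]
--     return first_dict
--
-- def DishPrepareOrder(order_list):
--     """
--     takes in a list of items and ordered and returns a list of unique items sorted by
--
--     the order of preperation
--
--     Parameters
--     ----------
--     order_list : list of integers
--
--     Returns
--     -------
--     out : list of integers
--
--     """
--     prelim_dictionary = prelim_dict(order_list)
--     count_list_final = count_list(prelim_dictionary)
--     swapped_dictionary = swap_key_value(prelim_dictionary)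
--     out = []
--     for i in count_list_final:
--         out.extend(swapped_dictionary[i])
--     return out
-- ===== SOURCE B (Python) =====
-- def DishPrepareOrder(order_list):
--     counts = {}
--     for i in order_list:
--         counts[i] = counts.get(i, 0) + 1
--     return sorted(counts, key=lambda x: (-counts[x], x))
-- ===== Notes on version B (the rewrite author's own statement) =====
-- stated objective: faster
-- what changed: Replaces A's pipeline (build frequency dict, extract+sort+dedup the frequency values descending, invert the dict into frequency->sorted-item-list buckets with an in-place re-sort on every append, concatenate buckets) with one frequency-count loop followed by a single composite-key sort of the distinct items by (-count, item).
import Mathlib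
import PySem

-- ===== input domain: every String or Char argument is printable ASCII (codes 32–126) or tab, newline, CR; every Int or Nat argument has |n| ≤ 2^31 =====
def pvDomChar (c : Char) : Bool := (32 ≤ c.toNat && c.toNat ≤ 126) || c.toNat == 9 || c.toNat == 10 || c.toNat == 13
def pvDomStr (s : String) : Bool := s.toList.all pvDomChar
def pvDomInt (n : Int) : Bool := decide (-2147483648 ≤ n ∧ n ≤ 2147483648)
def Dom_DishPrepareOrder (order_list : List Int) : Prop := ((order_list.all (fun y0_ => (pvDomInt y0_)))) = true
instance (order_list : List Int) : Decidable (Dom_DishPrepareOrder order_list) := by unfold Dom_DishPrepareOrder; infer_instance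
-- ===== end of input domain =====

-- B replaces A's dict-inversion pipeline with one count loop plus a single composite-key sort
-- by (-count, item); objective: simpler.

-- ===== PORT A =====
def prelimDict (L : List Int) : PySem.Dict Int Int :=
  L.foldl (fun out i =>
    if out.contains i then out.insert i (out.getD i 0 + 1) else out.insert i 1)
    PySem.Dict.empty

def countList (D : PySem.Dict Int Int) : List Int :=
  let cl := D.keys.foldl (fun acc i => acc ++ [D.getD i 0]) []
  let cls := PySem.List.sorted cl (fun x => x) true
  cls.foldl (fun fin i => if fin.contains i then fin else fin ++ [i]) []

def swapKeyValue (D : PySem.Dict Int Int) : PySem.Dict Int (List Int) :=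
  D.keys.foldl (fun fd i =>
    if fd.contains (D.getD i 0) then
      -- first_dict[D[i]].append(i); first_dict[D[i]].sort()
      fd.insert (D.getD i 0) (PySem.List.sorted (fd.getD (D.getD i 0) [] ++ [i]) (fun x => x) false)
    else
      fd.insert (D.getD i 0) [i])
    PySem.Dict.empty

def DishPrepareOrder (order_list : List Int) : List Int :=
  let prelim_dictionary := prelimDict order_list
  let count_list_final := countList prelim_dictionary
  let swapped_dictionary := swapKeyValue prelim_dictionary
  -- every i in count_list_final is a key of swapped_dictionary, so getD = Python's d[i]
  count_list_final.foldl (fun out i => out ++ swapped_dictionary.getD i []) []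

-- ===== PORT B =====
def DishPrepareOrder_alt (order_list : List Int) : List Int :=
  let counts := order_list.foldl (fun d i => d.insert i (d.getD i 0 + 1)) PySem.Dict.empty
  PySem.List.sorted2 counts.keys (fun x => -(counts.getD x 0)) (fun x => x) false

-- ===== PRECONDITION & SPEC =====
def Spec_DishPrepareOrder (order_list : List Int) (out : List Int) : Prop := out = DishPrepareOrder_alt order_list
instance (order_list : List Int) (out : List Int) : Decidable (Spec_DishPrepareOrder order_list out) := by unfold Spec_DishPrepareOrder; infer_instance

-- ===== CLAIM (what is proved, stated in full; the proofs are below) =====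
def Claim_equal_DishPrepareOrder : Prop := ∀ (order_list : List Int), Dom_DishPrepareOrder order_list → Spec_DishPrepareOrder order_list (DishPrepareOrder order_list)

-- ===== LEMMAS AND PROOFS =====

-- the composite key B sorts by, as a lexicographic key
def pvKey (L : List Int) (x : Int) : Lex (Int × Int) := toLex (-(L.count x : Int), x)

theorem pvKey_lt {L : List Int} {a b : Int}
    (h : (L.count b : Int) < (L.count a : Int) ∨ ((L.count a : Int) = (L.count b : Int) ∧ a < b)) :
    pvKey L a < pvKey L b := by
  unfold pvKey
  rcases h with h | ⟨h1, h2⟩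
  · exact Prod.Lex.toLex_lt_toLex.mpr (Or.inl (by omega))
  · exact Prod.Lex.toLex_lt_toLex.mpr (Or.inr ⟨by omega, h2⟩)

-- Python's tuple-key sort by (k1, k2) is the lexicographic-key sort
theorem sorted2_eq_sorted_toLex (xs : List Int) (k1 k2 : Int → Int) :
    PySem.List.sorted2 xs k1 k2 false
      = PySem.List.sorted xs (fun x => toLex (k1 x, k2 x)) false := by
  rw [PySem.List.sorted_eq_foldl_insertBy]
  show xs.foldl (fun acc x => PySem.List.insertBy
      (fun a b => decide (k1 a < k1 b) || (!decide (k1 b < k1 a) && decide (k2 a < k2 b))) x acc) []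
    = _
  congr 1
  funext acc x
  congr 1
  funext a b
  rw [Bool.eq_iff_iff]
  simp only [Bool.or_eq_true, Bool.and_eq_true, Bool.not_eq_true', decide_eq_true_eq,
    decide_eq_false_iff_not, Prod.Lex.lt_iff, ofLex_toLex]
  constructor
  · rintro (h | ⟨h1, h2⟩)
    · exact Or.inl h
    · rcases lt_or_eq_of_le (not_lt.mp h1) with h | h
      · exact Or.inl h
      · exact Or.inr ⟨h, h2⟩
  · rintro (h | ⟨h1, h2⟩)
    · exact Or.inl h
    · exact Or.inr ⟨by omega, h2⟩

-- A's first loop builds Counter(order_list)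
theorem prelimDict_eq (L : List Int) : prelimDict L = PySem.Dict.counter L := by
  rw [prelimDict, ← PySem.Dict.foldl_insert_getD_add_one_eq_counter]
  congr 1
  funext d i
  split
  next => rfl
  next h => rw [PySem.Dict.getD_of_not_contains d 0 (by simpa using h)]; norm_num

-- the dedup loop in countList is set(...)-in-order
theorem dedup_loop_eq (xs : List Int) :
    xs.foldl (fun fin i => if fin.contains i then fin else fin ++ [i]) []
      = PySem.Set.ofList xs := by
  rw [PySem.Set.ofList_eq_foldl]; rfl

-- PySem.Set.ofList is a sublist of its argument
theorem ofList_sublist (xs : List Int) : (PySem.Set.ofList xs).Sublist xs := by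
  rw [PySem.Set.ofList_eq_foldl]
  have key : ∀ (xs s : List Int), (xs.foldl PySem.Set.add s).Sublist (s ++ xs) := by
    intro xs
    induction xs with
    | nil => intro s; simp
    | cons x t ih =>
      intro s
      refine (ih (PySem.Set.add s x)).trans ?_
      have : (PySem.Set.add s x).Sublist (s ++ [x]) := by
        unfold PySem.Set.add
        split
        · exact List.sublist_append_left s [x]
        · simp
      simpa using this.append_right t
  simpa using key xs []

def countListFinal (L : List Int) : List Int :=
  PySem.Set.ofList (PySem.List.sorted ((PySem.Set.ofList L).map (fun k => (L.count k : Int))) (fun x => x) true)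

theorem countList_eq (L : List Int) : countList (PySem.Dict.counter L) = countListFinal L := by
  rw [countList, countListFinal]
  simp only [PySem.List.foldl_append_singleton_eq_map, List.nil_append]
  rw [dedup_loop_eq, PySem.Dict.keys_counter]
  congr 2
  exact List.map_congr_left (fun k _ => PySem.Dict.getD_counter L k)

theorem mem_countListFinal (L : List Int) (c : Int) :
    c ∈ countListFinal L ↔ ∃ k ∈ L, (L.count k : Int) = c := by
  rw [countListFinal, PySem.Set.mem_ofList, PySem.List.mem_sorted]
  simp [PySem.Set.mem_ofList]

theorem pairwise_countListFinal (L : List Int) :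
    (countListFinal L).Pairwise (fun a b => b < a) := by
  have hle : (countListFinal L).Pairwise (fun a b : Int => b ≤ a) :=
    List.Pairwise.sublist (ofList_sublist _) (PySem.List.sorted_pairwise_rev _ _)
  have hne : (countListFinal L).Pairwise (fun a b : Int => a ≠ b) :=
    PySem.Set.nodup_ofList _
  exact (hle.and hne).imp (fun h => lt_of_le_of_ne h.1 (Ne.symm h.2))

-- the i-th bucket of A's swapped dictionary: items of count c, sorted ascending
def bucket (L : List Int) (c : Int) : List Int :=
  PySem.List.sorted ((PySem.Set.ofList L).filter (fun k => (L.count k : Int) == c)) (fun x => x) false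

theorem swap_fold (D : PySem.Dict Int Int) (ks : List Int) (c : Int) :
    (ks.foldl (fun fd i =>
        if fd.contains (D.getD i 0) then
          fd.insert (D.getD i 0) (PySem.List.sorted (fd.getD (D.getD i 0) [] ++ [i]) (fun x => x) false)
        else
          fd.insert (D.getD i 0) [i]) PySem.Dict.empty).getD c []
      = PySem.List.sorted (ks.filter (fun k => D.getD k 0 == c)) (fun x => x) false := by
  -- collapse the two branches: on a fresh key the stored value [i] is sorted([] ++ [i])
  have hcollapse : (fun (fd : PySem.Dict Int (List Int)) (i : Int) =>
        if fd.contains (D.getD i 0) then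
          fd.insert (D.getD i 0) (PySem.List.sorted (fd.getD (D.getD i 0) [] ++ [i]) (fun x => x) false)
        else
          fd.insert (D.getD i 0) [i])
      = (fun fd i => fd.insert (D.getD i 0)
          (PySem.List.sorted (fd.getD (D.getD i 0) [] ++ [i]) (fun x => x) false)) := by
    funext fd i
    split
    next => rfl
    next h => rw [PySem.Dict.getD_of_not_contains fd [] (by simpa using h)]; rfl
  rw [hcollapse]
  induction ks using List.reverseRecOn with
  | nil => rfl
  | append_singleton t i ih =>
    rw [List.foldl_append, List.foldl_cons, List.foldl_nil, List.filter_append,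
      PySem.Dict.getD_insert]
    by_cases hc : c = D.getD i 0
    · subst hc
      rw [if_pos rfl, ih]
      have hfilter : [i].filter (fun k => D.getD k 0 == D.getD i 0) = [i] := by
        simp
      rw [hfilter]
      exact PySem.List.sorted_eq_sorted_of_perm _ _ _ Function.injective_id
        ((PySem.List.sorted_perm _ _ _).append_right [i])
    · rw [if_neg hc]
      have hni : (D.getD i 0 == c) = false := beq_eq_false_iff_ne.mpr (fun h => hc h.symm)
      have : [i].filter (fun k => D.getD k 0 == c) = [] := by
        simp [hni]
      rw [this, List.append_nil, ih]

theorem swapKeyValue_getD (L : List Int) (c : Int) :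
    (swapKeyValue (PySem.Dict.counter L)).getD c [] = bucket L c := by
  rw [swapKeyValue, swap_fold, bucket, PySem.Dict.keys_counter]
  congr 1
  refine List.filter_congr (fun k _ => ?_)
  rw [PySem.Dict.getD_counter]

theorem A_eq_flatMap (L : List Int) :
    DishPrepareOrder L = (countListFinal L).flatMap (bucket L) := by
  rw [DishPrepareOrder]
  simp only [prelimDict_eq, countList_eq]
  rw [show (fun (out : List Int) (i : Int) => out ++ (swapKeyValue (PySem.Dict.counter L)).getD i [])
      = (fun out i => out ++ bucket L i) by funext out i; rw [swapKeyValue_getD]]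
  rw [PySem.List.foldl_append_eq_flatMap, List.nil_append]

theorem mem_bucket (L : List Int) (c x : Int) :
    x ∈ bucket L c ↔ x ∈ L ∧ (L.count x : Int) = c := by
  rw [bucket, PySem.List.mem_sorted, List.mem_filter, PySem.Set.mem_ofList]
  simp

theorem bucket_pairwise (L : List Int) (c : Int) :
    (bucket L c).Pairwise (fun a b => pvKey L a < pvKey L b) := by
  have hle : (bucket L c).Pairwise (fun a b : Int => a ≤ b) :=
    PySem.List.sorted_pairwise _ _
  have hnd : (bucket L c).Nodup := by
    rw [bucket]
    exact ((PySem.List.sorted_perm _ _ _).nodup_iff).mpr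
      ((PySem.Set.nodup_ofList L).filter _)
  have hlt : (bucket L c).Pairwise (fun a b : Int => a < b) :=
    (hle.and hnd).imp (fun h => lt_of_le_of_ne h.1 h.2)
  refine hlt.imp_of_mem (fun {a b} ha hb h => ?_)
  have hca := (mem_bucket L c a).mp ha
  have hcb := (mem_bucket L c b).mp hb
  exact pvKey_lt (Or.inr ⟨by rw [hca.2, hcb.2], h⟩)

theorem A_pairwise (L : List Int) :
    (DishPrepareOrder L).Pairwise (fun a b => pvKey L a < pvKey L b) := by
  rw [A_eq_flatMap, List.pairwise_flatMap]
  constructor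
  · exact fun c _ => bucket_pairwise L c
  · refine (pairwise_countListFinal L).imp_of_mem (fun {c1 c2} _ _ h x hx y hy => ?_)
    have h1 := (mem_bucket L c1 x).mp hx
    have h2 := (mem_bucket L c2 y).mp hy
    exact pvKey_lt (Or.inl (by rw [h1.2, h2.2]; exact h))

theorem A_nodup (L : List Int) : (DishPrepareOrder L).Nodup := by
  refine (A_pairwise L).imp (fun {a b} h => ?_)
  intro hab
  subst hab
  exact lt_irrefl _ h

theorem A_perm (L : List Int) : (DishPrepareOrder L).Perm (PySem.Set.ofList L) := by
  rw [List.perm_ext_iff_of_nodup (A_nodup L) (PySem.Set.nodup_ofList L)]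
  intro x
  rw [A_eq_flatMap, List.mem_flatMap, PySem.Set.mem_ofList]
  constructor
  · rintro ⟨c, _, hx⟩
    exact ((mem_bucket L c x).mp hx).1
  · intro hx
    exact ⟨(L.count x : Int), (mem_countListFinal L _).mpr ⟨x, hx, rfl⟩,
      (mem_bucket L _ x).mpr ⟨hx, rfl⟩⟩

theorem B_eq_sorted (L : List Int) :
    DishPrepareOrder_alt L = PySem.List.sorted (PySem.Set.ofList L) (pvKey L) false := by
  rw [DishPrepareOrder_alt]
  simp only [PySem.Dict.foldl_insert_getD_add_one_eq_counter, PySem.Dict.keys_counter]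
  rw [sorted2_eq_sorted_toLex]
  congr 1
  funext x
  rw [PySem.Dict.getD_counter]
  rfl

-- ===== VERDICT (by name: the statement is the Claim_ definition above) =====
theorem DishPrepareOrder_spec : Claim_equal_DishPrepareOrder := by
  intro L _
  unfold Spec_DishPrepareOrder
  rw [B_eq_sorted]
  exact (PySem.List.sorted_eq_of_perm_of_pairwise_lt _ _ _ (A_perm L) (A_pairwise L)).symm
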